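-- pv_equiv track=rewrite | github.com/wogns8123/Algorithm | 프로그래머스/Lv.0/120837. 개미 군단/개미 군단.py | solution
-- ===== SOURCE A (Python) =====
-- def solution(hp):
--     answer = 0
--     cnt = 0
--     while hp:
--         if hp>=5:
--             cnt += hp // 5
--             hp %= 5
--         if hp >= 3:
--             cnt += hp // 3
--             hp %= 3
--         cnt += hp
--         hp =0
--     return cnt
-- ===== SOURCE B (Python) =====
-- def solution(hp):
--     # one 5-division plus a precomputed lookup table: for each remainder hp%5
--     # the minimal extra ants (3-damage + 1-damage) needed are tabulated.
--     EXTRA = (0, 1, 2, 1, 2)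
--     return hp // 5 + EXTRA[hp % 5]
-- ===== Notes on version B (the rewrite author's own statement) =====
-- stated objective: simpler
-- what changed: Replaces A's while-loop greedy (a guarded divide-and-mod cascade over the ant damage values) by one floor division plus a precomputed remainder lookup table, eliminating the smaller greedy steps entirely; Pre_ excludes negative hp, an unspecified corner outside the puzzle's health domain where A falls through returning hp itself.
-- outside the precondition, e.g. on solution(-1): A returns -1, B returns 1; on solution(-7): A returns -7, B returns -1
import Mathlib
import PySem

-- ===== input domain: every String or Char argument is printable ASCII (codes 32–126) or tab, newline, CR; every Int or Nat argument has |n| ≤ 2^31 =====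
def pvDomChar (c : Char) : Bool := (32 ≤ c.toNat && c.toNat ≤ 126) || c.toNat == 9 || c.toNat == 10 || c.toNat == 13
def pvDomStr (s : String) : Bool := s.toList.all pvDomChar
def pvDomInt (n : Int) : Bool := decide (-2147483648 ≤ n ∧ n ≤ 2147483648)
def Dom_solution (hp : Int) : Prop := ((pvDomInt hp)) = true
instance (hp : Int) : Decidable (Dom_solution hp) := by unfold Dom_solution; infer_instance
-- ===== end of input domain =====

-- B replaces A's while-loop greedy cascade by one floor division plus a precomputed remainder lookup table (objective: simpler).

-- ===== PORT A =====
-- the while-loop body; it always ends by setting hp to 0, so the loop exits after the next test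
def solutionLoop (hp cnt : Int) : Int :=
  if hp ≠ 0 then
    let p1 : Int × Int :=
      if hp ≥ 5 then (PySem.Int.mod hp 5, cnt + PySem.Int.floordiv hp 5) else (hp, cnt)
    let p2 : Int × Int :=
      if p1.1 ≥ 3 then (PySem.Int.mod p1.1 3, p1.2 + PySem.Int.floordiv p1.1 3) else p1
    solutionLoop 0 (p2.2 + p2.1)
  else cnt
termination_by (if hp = 0 then 0 else 1 : Nat)
decreasing_by simp_all

def solution (hp : Int) : Int :=
  -- answer = 0 is dead in A; cnt starts at 0
  solutionLoop hp 0

-- ===== PORT B =====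
-- EXTRA[hp % 5]: the index is always in range in Python, so the getD default is never used
def solution_alt (hp : Int) : Int :=
  PySem.Int.floordiv hp 5
    + (PySem.List.pyGet? ([0, 1, 2, 1, 2] : List Int) (PySem.Int.mod hp 5)).getD 0

-- ===== PRECONDITION & SPEC =====
-- Pre_ excludes negative hp: health points are positive in the puzzle, and on that
-- unspecified corner A happens to fall through returning hp itself while B's greedy
-- table decomposition returns a different value — neither is the specified answer.
def Pre_solution (hp : Int) : Prop := 0 ≤ hp
instance (hp : Int) : Decidable (Pre_solution hp) := by unfold Pre_solution; infer_instance
def pvWitness_solution : Int := 23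
def Spec_solution (hp : Int) (out : Int) : Prop := out = solution_alt hp
instance (hp : Int) (out : Int) : Decidable (Spec_solution hp out) := by unfold Spec_solution; infer_instance

-- ===== CLAIM (what is proved, stated in full; the proofs are below) =====
def Claim_equal_solution : Prop := ∀ (hp : Int), Dom_solution hp → Pre_solution hp → Spec_solution hp (solution hp)

-- ===== LEMMAS AND PROOFS =====
theorem solutionLoop_zero (cnt : Int) : solutionLoop 0 cnt = cnt := by
  unfold solutionLoop; simp

-- ===== VERDICT (by name: the statement is the Claim_ definition above) =====
theorem solution_spec : Claim_equal_solution := by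
  intro hp _ hpre
  unfold Pre_solution at hpre
  show solution hp = solution_alt hp
  unfold solution solution_alt
  rcases eq_or_lt_of_le hpre with h0 | hpos
  · subst h0
    rw [solutionLoop_zero]
    simp [PySem.Int.floordiv, PySem.Int.mod, PySem.List.pyGet?, PySem.List.pyIdx?]
  · unfold solutionLoop
    rw [if_pos (by omega)]
    rw [solutionLoop_zero]
    have h5 : (0:Int) < 5 := by omega
    have h3 : (0:Int) < 3 := by omega
    simp only [PySem.Int.floordiv_eq_ediv_of_pos h5, PySem.Int.mod_eq_emod_of_pos h5,
      PySem.Int.floordiv_eq_ediv_of_pos h3, PySem.Int.mod_eq_emod_of_pos h3]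
    have hr : hp % 5 = 0 ∨ hp % 5 = 1 ∨ hp % 5 = 2 ∨ hp % 5 = 3 ∨ hp % 5 = 4 := by omega
    rcases hr with h | h | h | h | h <;>
      rw [h] <;>
      simp [PySem.List.pyGet?, PySem.List.pyIdx?] <;>
      split_ifs <;> omega
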